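-- pv_equiv track=rewrite | github.com/yipingwang12/wiki-acronym-tables | src/wiki_acronyms/list_parser.py | _extract_first_table
-- ===== SOURCE A (Python) =====
-- def _extract_first_table(wikitext: str) -> str | None:
--     """Return wikitext of first wikitable, handling nested tables."""
--     start = wikitext.find("{|")
--     if start == -1:
--         return None
--     depth, i = 0, start
--     while i < len(wikitext):
--         if wikitext[i : i + 2] == "{|":
--             depth += 1
--             i += 2
--         elif wikitext[i : i + 2] == "|}":
--             depth -= 1
--             i += 2
--             if depth == 0:
--                 return wikitext[start:i]
--         else:
--             i += 1
--     return None
-- ===== SOURCE B (Python) =====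
-- def _extract_first_table(wikitext: str) -> str | None:
--     """Return wikitext of first wikitable, handling nested tables."""
--     start = wikitext.find("{|")
--     if start == -1:
--         return None
--     end = _table_end(wikitext, start + 2)
--     return None if end is None else wikitext[start:end]
--
--
-- def _table_end(s: str, i: int) -> int | None:
--     """Recursive descent: i is just past a '{|'; return the index just past
--     its matching '|}', recursing to skip each nested table, or None if unclosed."""
--     while i < len(s):
--         if s[i : i + 2] == "{|":
--             inner = _table_end(s, i + 2)
--             if inner is None:
--                 return None
--             i = inner
--         elif s[i : i + 2] == "|}":
--             return i + 2
--         else: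
--             i += 1
--     return None
-- ===== Notes on version B (the rewrite author's own statement) =====
-- stated objective: alternative
-- what changed: Replaces the flat depth-counter scan with a recursive-descent parser: a helper consumes one table body and recurses to skip each nested table wholesale, so no depth variable exists anywhere.
import Mathlib
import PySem

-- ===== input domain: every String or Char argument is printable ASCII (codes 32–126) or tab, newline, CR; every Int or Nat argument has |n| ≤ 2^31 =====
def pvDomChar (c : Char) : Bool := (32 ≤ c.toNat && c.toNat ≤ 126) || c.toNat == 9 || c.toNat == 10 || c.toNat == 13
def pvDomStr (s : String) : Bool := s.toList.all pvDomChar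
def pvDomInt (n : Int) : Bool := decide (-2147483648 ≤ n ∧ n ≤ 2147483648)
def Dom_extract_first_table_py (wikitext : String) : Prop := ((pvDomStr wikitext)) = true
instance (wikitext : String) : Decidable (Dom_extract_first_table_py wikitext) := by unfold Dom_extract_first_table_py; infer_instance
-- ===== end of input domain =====

-- B replaces A's flat depth-counter scan by a recursive-descent parser (a helper consumes one table body, recursing to skip nested tables); alternative decomposition, same cost.

-- ===== PORT A =====
-- wikitext[i:i+2] with 0 ≤ i is exactly (w.drop i).take 2; wikitext[start:i] with 0 ≤ start ≤ i is exactly (w.drop start).take (i - start).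
def extractFirstTableLoopA (w : List Char) (start i : Nat) (depth : Int) : Option String :=
  if _h : i < w.length then
    if (w.drop i).take 2 = ['{', '|'] then
      extractFirstTableLoopA w start (i + 2) (depth + 1)
    else if (w.drop i).take 2 = ['|', '}'] then
      -- python: depth -= 1; i += 2; if depth == 0: return wikitext[start:i]
      if depth - 1 = 0 then some (String.ofList ((w.drop start).take (i + 2 - start)))
      else extractFirstTableLoopA w start (i + 2) (depth - 1)
    else extractFirstTableLoopA w start (i + 1) depth
  else none
termination_by w.length - i

def extract_first_table_py (wikitext : String) : Option String :=
  let start := PySem.Str.find wikitext "{|"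
  if start = -1 then none
  -- start ≠ -1 ⇒ 0 ≤ start, so .toNat is exact
  else extractFirstTableLoopA wikitext.toList start.toNat start.toNat 0

-- ===== PORT B =====
-- _table_end(s, i): i is just past a '{|'; return the index just past its matching '|}',
-- recursing to skip each nested table, or none if unclosed. The returned index carries
-- the bound i < j ∧ j ≤ s.length only so the while loop's 'i = inner' step terminates.
def tableEnd (s : List Char) (i : Nat) : Option {j : Nat // i < j ∧ j ≤ s.length} :=
  if _h : i < s.length then
    if _h1 : (s.drop i).take 2 = ['{', '|'] then
      match tableEnd s (i + 2) with
      | none => none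
      | some ⟨j, hj⟩ =>
        match tableEnd s j with          -- the while loop continues with i = inner
        | none => none
        | some ⟨k, hk⟩ => some ⟨k, by omega⟩
    else if h2 : (s.drop i).take 2 = ['|', '}'] then
      some ⟨i + 2, by
        have := congrArg List.length h2
        simp [List.length_take, List.length_drop] at this
        omega⟩
    else
      match tableEnd s (i + 1) with
      | none => none
      | some ⟨j, hj⟩ => some ⟨j, by omega⟩
  else none
termination_by s.length - i
decreasing_by all_goals omega

def extract_first_table_py_alt (wikitext : String) : Option String :=
  let start := PySem.Str.find wikitext "{|"
  if start = -1 then none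
  else
    match tableEnd wikitext.toList (start.toNat + 2) with
    | none => none
    | some ⟨e, _⟩ =>
      some (String.ofList ((wikitext.toList.drop start.toNat).take (e - start.toNat)))

-- ===== PRECONDITION & SPEC =====
def Spec_extract_first_table_py (wikitext : String) (out : Option String) : Prop := out = extract_first_table_py_alt wikitext
instance (wikitext : String) (out : Option String) : Decidable (Spec_extract_first_table_py wikitext out) := by unfold Spec_extract_first_table_py; infer_instance

-- ===== CLAIM (what is proved, stated in full; the proofs are below) =====
def Claim_equal_extract_first_table_py : Prop := ∀ (wikitext : String), Dom_extract_first_table_py wikitext → Spec_extract_first_table_py wikitext (extract_first_table_py wikitext)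

-- ===== LEMMAS AND PROOFS =====

-- A's indexed loop at depth d ≥ 1 is: find the end of the current table body (tableEnd),
-- then either return the slice (d = 1) or pop one level and continue.
theorem loopA_eq_tableEnd (w : List Char) (start : Nat) :
    ∀ n i depth, w.length - i ≤ n → 1 ≤ depth →
      extractFirstTableLoopA w start i depth
        = match tableEnd w i with
          | none => none
          | some ⟨j, _⟩ =>
            if depth = 1 then some (String.ofList ((w.drop start).take (j - start)))
            else extractFirstTableLoopA w start j (depth - 1) := by
  intro n
  induction n with
  | zero =>
    intro i depth hn _
    have hlen : w.length ≤ i := by omega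
    rw [extractFirstTableLoopA, tableEnd]
    simp [Nat.not_lt.2 hlen]
  | succ n ih =>
    intro i depth hn hd
    by_cases hi : i < w.length
    · rw [extractFirstTableLoopA, tableEnd, dif_pos hi, dif_pos hi]
      by_cases h1 : (w.drop i).take 2 = ['{', '|']
      · rw [if_pos h1, dif_pos h1]
        rw [ih (i + 2) (depth + 1) (by omega) (by omega)]
        rcases he : tableEnd w (i + 2) with _ | ⟨j, hj⟩
        · simp
        · simp only
          rw [if_neg (by omega)]
          have hdd : depth + 1 - 1 = depth := by omega
          rw [hdd, ih j depth (by omega) hd]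
          rcases hej : tableEnd w j with _ | ⟨k, hk⟩ <;> simp
      · rw [if_neg h1, dif_neg h1]
        by_cases h2 : (w.drop i).take 2 = ['|', '}']
        · rw [if_pos h2, dif_pos h2]
          simp only
          by_cases hd1 : depth = 1
          · rw [if_pos (by omega), if_pos hd1]
          · rw [if_neg (by omega), if_neg hd1]
        · rw [if_neg h2, dif_neg h2]
          rw [ih (i + 1) depth (by omega) hd]
          rcases he : tableEnd w (i + 1) with _ | ⟨j, hj⟩ <;> simp
    · have hlen : w.length ≤ i := by omega
      rw [extractFirstTableLoopA, tableEnd]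
      simp [Nat.not_lt.2 hlen]

-- ===== VERDICT (by name: the statement is the Claim_ definition above) =====
theorem extract_first_table_py_spec : Claim_equal_extract_first_table_py := by
  intro wikitext _
  unfold Spec_extract_first_table_py
  simp only [extract_first_table_py, extract_first_table_py_alt]
  by_cases h : PySem.Str.find wikitext "{|" = -1
  · rw [if_pos h, if_pos h]
  · rw [if_neg h, if_neg h]
    have hfind : PySem.Str.find wikitext "{|" = PySem.Chars.find wikitext.toList ['{', '|'] := by
      simp [PySem.Str.find_eq]
    have hnn : 0 ≤ PySem.Chars.find wikitext.toList ['{', '|'] := by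
      have := PySem.Chars.neg_one_le_find (s := wikitext.toList) (sub := ['{', '|'])
      rw [hfind] at h; omega
    have hpre : ['{', '|'] <+: wikitext.toList.drop (PySem.Str.find wikitext "{|").toNat := by
      rw [hfind]; exact (PySem.Chars.find_spec hnn).1
    have htake : (wikitext.toList.drop (PySem.Str.find wikitext "{|").toNat).take 2 = ['{', '|'] :=
      (List.prefix_iff_eq_take.1 hpre).symm
    have hlt : (PySem.Str.find wikitext "{|").toNat < wikitext.toList.length := by
      have h2 : 2 ≤ (wikitext.toList.drop (PySem.Str.find wikitext "{|").toNat).length := by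
        simpa using hpre.length_le
      simp only [List.length_drop] at h2; omega
    rw [extractFirstTableLoopA, dif_pos hlt, if_pos htake,
      show (0 : Int) + 1 = 1 from rfl,
      loopA_eq_tableEnd wikitext.toList _ wikitext.toList.length _ 1 (by omega) (by omega)]
    rcases he : tableEnd wikitext.toList ((PySem.Str.find wikitext "{|").toNat + 2) with _ | ⟨j, hj⟩ <;>
      simp
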